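-- pv_equiv track=rewrite | github.com/aivan-au/Latte | Latte.py | _clean_annotation
-- ===== SOURCE A (Python) =====
-- def _clean_annotation(annotation):
--     """
--     Clean up annotation text by removing unwanted punctuation and formatting.
--
--     Args:
--         annotation (str): Raw annotation from LLM
--
--     Returns:
--         str: Cleaned annotation
--     """
--     if not annotation:
--         return annotation
--
--     # Strip whitespace
--     cleaned = annotation.strip()
--
--     # Remove trailing punctuation (dots, commas, semicolons, etc.)
--     while cleaned and cleaned[-1] in '.,:;!?':
--         cleaned = cleaned[:-1].strip()
--
--     # Remove quotes if they wrap the entire annotation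
--     if len(cleaned) >= 2:
--         if (cleaned.startswith('"') and cleaned.endswith('"')) or \
--            (cleaned.startswith("'") and cleaned.endswith("'")):
--             cleaned = cleaned[1:-1].strip()
--
--     # Ensure first letter is capitalized
--     if cleaned:
--         cleaned = cleaned[0].upper() + cleaned[1:]
--
--     return cleaned
-- ===== SOURCE B (Python) =====
-- def _clean_annotation(annotation):
--     """Single backward scan for the trailing punctuation/whitespace trim
--     (instead of A's repeated slice-and-strip loop), then quote-unwrap and
--     capitalize."""
--     if not annotation:
--         return annotation
--
--     s = annotation.strip()
--
--     # One O(n) backward scan: cut every trailing char that is listed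
--     # punctuation or whitespace.
--     end = len(s)
--     while end > 0 and (s[end - 1] in '.,:;!?' or s[end - 1].isspace()):
--         end -= 1
--     cleaned = s[:end]
--
--     # Unwrap a matching pair of quotes around the whole annotation.
--     if len(cleaned) >= 2:
--         first, last = cleaned[0], cleaned[-1]
--         if first == last and first in '"\'':
--             cleaned = cleaned[1:-1].strip()
--
--     # Capitalize the first letter.
--     if cleaned:
--         cleaned = cleaned[0].upper() + cleaned[1:]
--
--     return cleaned
-- ===== Notes on version B (the rewrite author's own statement) =====
-- stated objective: alternative
-- what changed: The trailing-punctuation trim is computed by a single backward index scan over the stripped string (cutting listed punctuation and whitespace in one pass) instead of A's loop that repeatedly slices off the last character and re-strips the whole string.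
import Mathlib
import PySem

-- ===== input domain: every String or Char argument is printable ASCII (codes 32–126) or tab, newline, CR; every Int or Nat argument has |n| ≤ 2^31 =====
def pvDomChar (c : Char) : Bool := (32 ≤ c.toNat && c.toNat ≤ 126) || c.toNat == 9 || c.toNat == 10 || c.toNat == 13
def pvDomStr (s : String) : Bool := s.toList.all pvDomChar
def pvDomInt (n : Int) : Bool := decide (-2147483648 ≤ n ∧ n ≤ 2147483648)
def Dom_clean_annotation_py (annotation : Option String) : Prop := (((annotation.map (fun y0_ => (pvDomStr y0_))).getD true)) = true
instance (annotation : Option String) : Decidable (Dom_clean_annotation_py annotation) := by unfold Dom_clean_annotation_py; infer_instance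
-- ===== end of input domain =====

-- B replaces A's repeated slice-and-restrip loop for the trailing trim by a single
-- backward index scan (objective: alternative decomposition, same result).

-- ===== PORT A =====

-- `c in '.,:;!?'`
def isPunctA (c : Char) : Bool :=
  c == '.' || c == ',' || c == ':' || c == ';' || c == '!' || c == '?'

-- length fact cited by the while-loop's termination proof
theorem strip_length_le (cs : List Char) :
    (PySem.Chars.strip cs).length ≤ cs.length := by
  have h1 := List.length_dropWhile_le PySem.Chars.isspace (PySem.Chars.lstrip cs).reverse
  have h2 := List.length_dropWhile_le PySem.Chars.isspace cs
  unfold PySem.Chars.strip PySem.Chars.rstrip PySem.Chars.lstrip at *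
  simp at *
  omega

-- A's while loop: `while cleaned and cleaned[-1] in '.,:;!?': cleaned = cleaned[:-1].strip()`
def trimA (cs : List Char) : List Char :=
  if h : cs = [] then cs
  else if isPunctA (cs.getLast h) then trimA (PySem.Chars.strip cs.dropLast)
  else cs
termination_by cs.length
decreasing_by
  have h1 : (PySem.Chars.strip cs.dropLast).length ≤ cs.dropLast.length :=
    strip_length_le _
  have h2 : 0 < cs.length := List.length_pos_of_ne_nil h
  simp [List.length_dropLast] at *
  omega

-- the quote-unwrap block of A
def unwrapA (cs : List Char) : List Char :=
  if 2 ≤ cs.length then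
    if (PySem.Chars.startswith cs ['"'] && PySem.Chars.endswith cs ['"']) ||
       (PySem.Chars.startswith cs ['\''] && PySem.Chars.endswith cs ['\'']) then
      PySem.Chars.strip (PySem.Chars.slice cs (some 1) (some (-1)))   -- cleaned[1:-1].strip()
    else cs
  else cs

-- `if cleaned: cleaned = cleaned[0].upper() + cleaned[1:]`
def capA (cs : List Char) : List Char :=
  match cs with
  | [] => []
  | c :: rest => PySem.Chars.upperChar c :: rest

def clean_annotation_py (annotation : Option String) : Option String :=
  match annotation with
  | none => none                                   -- `if not annotation: return annotation`
  | some s =>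
    if s = "" then some s
    else
      some (String.ofList (capA (unwrapA (trimA (PySem.Chars.strip s.toList)))))

-- ===== PORT B =====

-- `c in '.,:;!?'`
def isPunctB (c : Char) : Bool := ['.', ',', ':', ';', '!', '?'].contains c

-- B's backward scan: `end = len(s); while end > 0 and (s[end-1] in '.,:;!?' or s[end-1].isspace()): end -= 1`
def scanEndB (cs : List Char) : Nat → Nat
  | 0 => 0
  | e + 1 =>
    if isPunctB (cs.getD e ' ') || PySem.Chars.isspace (cs.getD e ' ') then
      scanEndB cs e
    else e + 1

-- B's quote unwrap (`first == last and first in '"\''`); cleaned[1:-1] ported as tail.dropLast (exact: the branch needs len ≥ 2)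
def unwrapB (cs : List Char) : List Char :=
  if 2 ≤ cs.length then
    match cs.head?, cs.getLast? with
    | some f, some l =>
      if f == l && (f == '"' || f == '\'') then
        PySem.Chars.strip cs.tail.dropLast
      else cs
    | _, _ => cs
  else cs

def capB (cs : List Char) : List Char :=
  if cs.isEmpty then cs else PySem.Chars.upperChar (cs.headD ' ') :: cs.tail

def clean_annotation_py_alt (annotation : Option String) : Option String :=
  match annotation with
  | none => none
  | some s =>
    if s.toList.isEmpty then some s
    else
      let t := PySem.Chars.strip s.toList
      some (String.ofList (capB (unwrapB (t.take (scanEndB t t.length)))))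

-- ===== PRECONDITION & SPEC =====
def Spec_clean_annotation_py (annotation : Option String) (out : Option String) : Prop := out = clean_annotation_py_alt annotation
instance (annotation : Option String) (out : Option String) : Decidable (Spec_clean_annotation_py annotation out) := by unfold Spec_clean_annotation_py; infer_instance

-- ===== CLAIM (what is proved, stated in full; the proofs are below) =====
def Claim_equal_clean_annotation_py : Prop := ∀ (annotation : Option String), Dom_clean_annotation_py annotation → Spec_clean_annotation_py annotation (clean_annotation_py annotation)

-- ===== LEMMAS AND PROOFS =====

-- the character class both trims cut: listed punctuation or whitespace
def predT (c : Char) : Bool := isPunctA c || PySem.Chars.isspace c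

theorem punct_eq (c : Char) : isPunctB c = isPunctA c := by
  rw [Bool.eq_iff_iff]
  simp [isPunctA, isPunctB]
  tauto

theorem scanEndB_le (cs : List Char) (e : Nat) : scanEndB cs e ≤ e := by
  induction e with
  | zero => simp [scanEndB]
  | succ e ih =>
    simp only [scanEndB]
    split
    · omega
    · omega

theorem scanEndB_append (ys : List Char) (c : Char) (e : Nat) (he : e ≤ ys.length) :
    scanEndB (ys ++ [c]) e = scanEndB ys e := by
  induction e with
  | zero => simp [scanEndB]
  | succ e ih =>
    have hget : (ys ++ [c]).getD e ' ' = ys.getD e ' ' := by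
      have : e < ys.length := by omega
      simp [List.getD, List.getElem?_append_left this]
    simp only [scanEndB, hget]
    rw [ih (by omega)]

-- B's scan computes rdropWhile predT
theorem take_scanEndB (cs : List Char) :
    cs.take (scanEndB cs cs.length) = cs.rdropWhile predT := by
  induction cs using List.reverseRecOn with
  | nil => simp [scanEndB, List.rdropWhile]
  | append_singleton ys c ih =>
    have hget : (ys ++ [c]).getD ys.length ' ' = c := by
      simp [List.getD]
    have hlen : (ys ++ [c]).length = ys.length + 1 := by simp
    rw [hlen]
    simp only [scanEndB, hget, punct_eq]
    rw [List.rdropWhile_concat]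
    by_cases hp : (isPunctA c || PySem.Chars.isspace c)
    · rw [if_pos hp, if_pos (show predT c = true from hp)]
      rw [scanEndB_append ys c ys.length le_rfl]
      rw [List.take_append_of_le_length (scanEndB_le ys ys.length)]
      exact ih
    · rw [if_neg hp, if_neg (show ¬ predT c = true from hp)]
      simp

-- dropping a weaker class first does not change dropWhile of a stronger class
theorem dropWhile_dropWhile {α : Type} (p q : α → Bool) (h : ∀ a, q a → p a)
    (l : List α) : (l.dropWhile q).dropWhile p = l.dropWhile p := by
  induction l with
  | nil => simp
  | cons a l ih =>
    by_cases hq : q a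
    · simp [hq, h a hq, ih]
    · simp [List.dropWhile_cons, hq]

theorem rdropWhile_rdropWhile {α : Type} (p q : α → Bool) (h : ∀ a, q a → p a)
    (l : List α) : (l.rdropWhile q).rdropWhile p = l.rdropWhile p := by
  simp [List.rdropWhile, dropWhile_dropWhile p q h]

theorem rstrip_eq_rdropWhile (cs : List Char) :
    PySem.Chars.rstrip cs = cs.rdropWhile PySem.Chars.isspace := rfl

theorem isspace_predT (c : Char) : PySem.Chars.isspace c → predT c := by
  simp [predT]; tauto

-- dropWhile-fixedness gives ¬p on the head
theorem not_p_head {α : Type} (p : α → Bool) (a : α) (l : List α)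
    (h : (a :: l).dropWhile p = a :: l) : ¬ p a := by
  intro hp
  have := List.length_dropWhile_le p l
  have h' := congrArg List.length h
  simp [hp] at h'
  omega

-- dropWhile-fixedness survives dropLast
theorem dropWhile_fix_dropLast {α : Type} (p : α → Bool) (l : List α)
    (h : l.dropWhile p = l) : l.dropLast.dropWhile p = l.dropLast := by
  cases l with
  | nil => simp
  | cons a l =>
    have ha : ¬ p a := not_p_head p a l h
    cases l with
    | nil => simp
    | cons b m => simp [ha]

-- dropWhile-fixedness survives rdropWhile
theorem dropWhile_fix_rdropWhile {α : Type} (p : α → Bool) (l : List α)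
    (h : l.dropWhile p = l) : (l.rdropWhile p).dropWhile p = l.rdropWhile p := by
  cases l with
  | nil => simp
  | cons a l =>
    have ha : ¬ p a := not_p_head p a l h
    rcases hpref : (a :: l).rdropWhile p with _ | ⟨b, m⟩
    · simp
    · have hpfx : b :: m <+: a :: l := hpref ▸ List.rdropWhile_prefix p (a :: l)
      have hb : b = a := by
        rcases hpfx with ⟨t, ht⟩
        exact (List.cons.injEq .. ▸ ht).1
      simp [hb, ha]

-- A's loop computes rdropWhile predT on a fully-stripped input
theorem trimA_eq (cs : List Char)
    (hl : cs.dropWhile PySem.Chars.isspace = cs)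
    (hr : cs.rdropWhile PySem.Chars.isspace = cs) :
    trimA cs = cs.rdropWhile predT := by
  induction hn : cs.length using Nat.strong_induction_on generalizing cs with
  | _ n ih =>
  rcases List.eq_nil_or_concat cs with rfl | ⟨ys, c, rfl⟩
  · simp [trimA, List.rdropWhile]
  · simp only [List.concat_eq_append] at hl hr hn ⊢
    have hne : ys ++ [c] ≠ [] := by simp
    have hlast : (ys ++ [c]).getLast hne = c := List.getLast_concat
    rw [trimA]
    rw [dif_neg (by simp), hlast]
    have hdl : (ys ++ [c]).dropLast = ys := by simp
    by_cases hp : isPunctA c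
    · -- last char is punctuation: A recurses on strip(dropLast)
      rw [if_pos hp, hdl]
      -- ys is still lstrip-fixed
      have hly : ys.dropWhile PySem.Chars.isspace = ys := by
        have := dropWhile_fix_dropLast PySem.Chars.isspace (ys ++ [c]) hl
        rwa [hdl] at this
      have hstrip : PySem.Chars.strip ys = ys.rdropWhile PySem.Chars.isspace := by
        unfold PySem.Chars.strip PySem.Chars.lstrip
        rw [hly, rstrip_eq_rdropWhile]
      rw [hstrip]
      set z := ys.rdropWhile PySem.Chars.isspace with hz
      have hzl : z.dropWhile PySem.Chars.isspace = z :=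
        dropWhile_fix_rdropWhile _ _ hly
      have hzr : z.rdropWhile PySem.Chars.isspace = z := by
        simp [hz, List.rdropWhile_idempotent]
      have hzlen : z.length ≤ ys.length := by
        have := (List.rdropWhile_prefix PySem.Chars.isspace ys).length_le
        simpa [hz] using this
      have hlt : z.length < n := by
        have hlen : (ys ++ [c]).length = n := hn
        simp at hlen
        omega
      rw [ih z.length hlt z hzl hzr rfl]
      rw [hz, rdropWhile_rdropWhile predT PySem.Chars.isspace isspace_predT]
      rw [List.rdropWhile_concat]
      simp [predT, hp]
    · -- last char is neither punctuation nor (cs being rstrip-fixed) space: both keep cs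
      rw [if_neg hp]
      have hs : ¬ PySem.Chars.isspace c := by
        intro hsp
        have h' := congrArg List.length hr
        rw [List.rdropWhile_concat] at h'
        simp [hsp] at h'
        have := (List.rdropWhile_prefix PySem.Chars.isspace ys).length_le
        omega
      rw [List.rdropWhile_concat]
      simp [predT, hp, hs]

-- cleaned[1:-1] with the first and last chars explicit
theorem slice_one_neg_one (a b : Char) (ys : List Char) :
    PySem.List.slice (a :: (ys ++ [b])) (some 1) (some (-1)) = ys := by
  simp [PySem.List.slice, PySem.List.clampIdx]
  rw [if_neg (by omega)]
  simp

-- A's and B's quote-unwrap blocks agree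
theorem unwrap_eq (cs : List Char) : unwrapA cs = unwrapB cs := by
  unfold unwrapA unwrapB
  by_cases h2 : 2 ≤ cs.length
  · rw [if_pos h2, if_pos h2]
    rcases cs with _ | ⟨a, rest⟩
    · simp only [List.length_nil] at h2; omega
    · rcases List.eq_nil_or_concat rest with rfl | ⟨ys, b, rfl⟩
      · simp only [List.length_cons, List.length_nil] at h2; omega
      · simp only [List.concat_eq_append] at h2 ⊢
        have hhead : (a :: (ys ++ [b])).head? = some a := rfl
        have hlast : (a :: (ys ++ [b])).getLast? = some b := by
          rw [show a :: (ys ++ [b]) = (a :: ys) ++ [b] by simp, List.getLast?_concat]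
        rw [hhead, hlast]
        have htd : (a :: (ys ++ [b])).tail.dropLast = ys := by simp
        rw [htd, PySem.Chars.slice_eq_listSlice, slice_one_neg_one]
        have hsw : ∀ q : Char, PySem.Chars.startswith (a :: (ys ++ [b])) [q] = (q == a) := by
          intro q
          simp [PySem.Chars.startswith, List.isPrefixOf]
        have hew : ∀ q : Char, PySem.Chars.endswith (a :: (ys ++ [b])) [q] = (q == b) := by
          intro q
          simp [PySem.Chars.endswith, List.isSuffixOf, List.isPrefixOf]
        rw [hsw, hsw, hew, hew]
        by_cases ha1 : a = '"' <;> by_cases ha2 : a = '\'' <;> by_cases hb1 : b = '"' <;>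
          by_cases hb2 : b = '\'' <;> simp_all <;>
            (intro h
             first
               | (rcases h with ⟨h1, _⟩ | ⟨h1, _⟩ <;> simp_all [h1.symm])
               | simp_all [h.symm])
  · rw [if_neg h2, if_neg h2]

-- A's and B's capitalization agree
theorem cap_eq (cs : List Char) : capA cs = capB cs := by
  cases cs <;> simp [capA, capB]

-- the fully-stripped string is a fixed point of lstrip and rstrip
theorem strip_fixes (cs : List Char) :
    (PySem.Chars.strip cs).dropWhile PySem.Chars.isspace = PySem.Chars.strip cs ∧
    (PySem.Chars.strip cs).rdropWhile PySem.Chars.isspace = PySem.Chars.strip cs := by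
  unfold PySem.Chars.strip PySem.Chars.lstrip
  rw [rstrip_eq_rdropWhile]
  constructor
  · exact dropWhile_fix_rdropWhile _ _ (List.dropWhile_idempotent _ _)
  · exact List.rdropWhile_idempotent _ _

-- ===== VERDICT (by name: the statement is the Claim_ definition above) =====
theorem clean_annotation_py_spec : Claim_equal_clean_annotation_py := by
  intro annotation _
  unfold Spec_clean_annotation_py clean_annotation_py clean_annotation_py_alt
  cases annotation with
  | none => rfl
  | some s =>
    simp only
    by_cases hs : s = ""
    · simp [hs]
    · have hs' : ¬ s.toList.isEmpty = true := by
        simp only [List.isEmpty_iff]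
        intro h
        exact hs (String.toList_eq_nil_iff.mp h)
      rw [if_neg hs, if_neg hs']
      obtain ⟨hl, hr⟩ := strip_fixes s.toList
      rw [trimA_eq _ hl hr, take_scanEndB, unwrap_eq, cap_eq]
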